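-- pv_equiv track=rewrite | github.com/SRI-CSL/trio-quicly | tests/test_acks_roundtrip.py | _intervals_from_set
-- ===== SOURCE A (Python) =====
-- def _intervals_from_set(pns: set[int]):
--     if not pns:
--         return []
--     nums = sorted(pns)
--     ranges = []
--     start = prev = nums[0]
--     for x in nums[1:]:
--         if x == prev + 1:
--             prev = x
--             continue
--         ranges.append((start, prev))
--         start = prev = x
--     ranges.append((start, prev))
--     ranges.sort(key=lambda r: r[1], reverse=True)
--     return ranges
-- ===== SOURCE B (Python) =====
-- def _intervals_from_set(pns: set[int]):
--     s = set(pns)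
--     out = []
--     for x in s:
--         if x - 1 not in s:
--             e = x
--             while e + 1 in s:
--                 e += 1
--             out.append((x, e))
--     out.sort(key=lambda r: r[1], reverse=True)
--     return out
-- ===== Notes on version B (the rewrite author's own statement) =====
-- stated objective: alternative
-- what changed: Replaced sort-all-elements-then-group-adjacent with hash-set run detection: each element whose predecessor is absent starts a run that is walked forward by membership tests, and only the collected intervals are sorted descending by end.
import Mathlib
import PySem

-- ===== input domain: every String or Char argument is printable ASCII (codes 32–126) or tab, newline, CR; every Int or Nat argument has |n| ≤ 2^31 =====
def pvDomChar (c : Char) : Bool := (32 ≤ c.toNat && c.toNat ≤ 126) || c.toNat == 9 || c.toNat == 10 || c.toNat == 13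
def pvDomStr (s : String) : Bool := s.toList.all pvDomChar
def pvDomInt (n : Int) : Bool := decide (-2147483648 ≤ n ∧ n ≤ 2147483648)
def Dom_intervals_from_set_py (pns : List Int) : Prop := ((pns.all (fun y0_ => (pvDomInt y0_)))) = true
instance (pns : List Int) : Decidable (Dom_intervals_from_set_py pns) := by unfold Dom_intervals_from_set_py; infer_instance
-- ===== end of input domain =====

-- B replaces sort-all-then-group-adjacent by hash-set run detection (walk each run forward from
-- its start), sorting only the collected intervals descending by end; an alternative algorithm.

-- ===== PORT A =====
def intervals_from_set_py (pns : List Int) : List (Int × Int) :=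
  if pns = [] then []
  else
    match PySem.List.sorted pns (fun x => x) false with
    | [] => []
    | n0 :: tail =>
      -- start = prev = nums[0]; for x in nums[1:]: …
      let st := tail.foldl (fun (acc : List (Int × Int) × Int × Int) x =>
          if x = acc.2.2 + 1 then (acc.1, acc.2.1, x)
          else (acc.1 ++ [(acc.2.1, acc.2.2)], x, x)) ([], n0, n0)
      PySem.List.sorted (st.1 ++ [(st.2.1, st.2.2)]) (fun r => r.2) true

-- ===== PORT B =====
-- 'while e + 1 in s: e += 1', fuel-bounded for totality (fuel s.length suffices, proved below)
def pvWalkEnd (s : List Int) (e : Int) : Nat → Int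
  | 0 => e
  | f + 1 => if (e + 1) ∈ s then pvWalkEnd s (e + 1) f else e

def intervals_from_set_py_alt (pns : List Int) : List (Int × Int) :=
  let s := PySem.Set.ofList pns
  let out := s.foldl (fun out x =>
      if (x - 1) ∈ s then out
      else out ++ [(x, pvWalkEnd s x s.length)]) []
  PySem.List.sorted out (fun r => r.2) true

-- ===== PRECONDITION & SPEC =====
-- Pre_: the Python parameter is a set[int]; its List Int encoding holds the distinct elements,
-- so duplicate-carrying lists encode no Python input and are excluded.
def Pre_intervals_from_set_py (pns : List Int) : Prop := pns.Nodup
instance (pns : List Int) : Decidable (Pre_intervals_from_set_py pns) := by unfold Pre_intervals_from_set_py; infer_instance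
def pvWitness_intervals_from_set_py : List Int := [5, 1, 2]

def Spec_intervals_from_set_py (pns : List Int) (out : List (Int × Int)) : Prop := out = intervals_from_set_py_alt pns
instance (pns : List Int) (out : List (Int × Int)) : Decidable (Spec_intervals_from_set_py pns out) := by unfold Spec_intervals_from_set_py; infer_instance

-- ===== CLAIM (what is proved, stated in full; the proofs are below) =====
def Claim_equal_intervals_from_set_py : Prop := ∀ (pns : List Int), Dom_intervals_from_set_py pns → Pre_intervals_from_set_py pns → Spec_intervals_from_set_py pns (intervals_from_set_py pns)

-- ===== LEMMAS AND PROOFS =====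

-- maximal-run predicate: [a,b] is a maximal contiguous run of the membership predicate M
def pvMax (M : Int → Prop) (a b : Int) : Prop :=
  M a ∧ a ≤ b ∧ (∀ y, a ≤ y → y ≤ b → M y) ∧ ¬ M (a - 1) ∧ ¬ M (b + 1)

def pvM (s p : Int) (l : List Int) (y : Int) : Prop := (s ≤ y ∧ y ≤ p) ∨ y ∈ l

-- recursive form of A's grouping loop
def pvGroup (s p : Int) : List Int → List (Int × Int)
  | [] => [(s, p)]
  | x :: t => if x = p + 1 then pvGroup s x t else (s, p) :: pvGroup x x t

theorem pvMax_congr {M M' : Int → Prop} (h : ∀ y, M y ↔ M' y) (a b : Int) :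
    pvMax M a b ↔ pvMax M' a b := by
  unfold pvMax; simp only [h]

theorem pvGroup_foldl (l : List Int) (rs : List (Int × Int)) (s p : Int) :
    (l.foldl (fun (acc : List (Int × Int) × Int × Int) x =>
        if x = acc.2.2 + 1 then (acc.1, acc.2.1, x)
        else (acc.1 ++ [(acc.2.1, acc.2.2)], x, x)) (rs, s, p)).1
      ++ [((l.foldl (fun (acc : List (Int × Int) × Int × Int) x =>
        if x = acc.2.2 + 1 then (acc.1, acc.2.1, x)
        else (acc.1 ++ [(acc.2.1, acc.2.2)], x, x)) (rs, s, p)).2.1,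
          (l.foldl (fun (acc : List (Int × Int) × Int × Int) x =>
        if x = acc.2.2 + 1 then (acc.1, acc.2.1, x)
        else (acc.1 ++ [(acc.2.1, acc.2.2)], x, x)) (rs, s, p)).2.2)]
      = rs ++ pvGroup s p l := by
  induction l generalizing rs s p with
  | nil => simp [pvGroup]
  | cons x t ih =>
    simp only [List.foldl_cons, pvGroup]
    by_cases hx : x = p + 1
    · simp [hx, ih]
    · simp [hx, ih]

theorem mem_pvGroup {l : List Int} {s p : Int} (hsp : s ≤ p)
    (hps : l.Pairwise (· < ·)) (hgt : ∀ x ∈ l, p < x) (a b : Int) :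
    (a, b) ∈ pvGroup s p l ↔ pvMax (pvM s p l) a b := by
  induction l generalizing s p with
  | nil =>
    simp only [pvGroup, List.mem_singleton, Prod.mk.injEq, pvMax, pvM, List.not_mem_nil, or_false]
    constructor
    · rintro ⟨rfl, rfl⟩
      refine ⟨⟨le_refl _, hsp⟩, hsp, fun y h1 h2 => ⟨h1, h2⟩, by omega, by omega⟩
    · rintro ⟨ha, hab, hint, hma, hmb⟩
      have hb := hint b (by omega) (by omega)
      constructor <;> omega
  | cons x t ih =>
    have hxt : ∀ y ∈ t, x < y := fun y hy => (List.pairwise_cons.mp hps).1 y hy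
    have hxp : p < x := hgt x (List.mem_cons_self ..)
    have hMiff : ∀ q, pvM s p (x :: t) q ↔ ((s ≤ q ∧ q ≤ p) ∨ q = x ∨ q ∈ t) := by
      intro q; simp [pvM]
    by_cases hx : x = p + 1
    · simp only [pvGroup, if_pos hx]
      rw [ih (by omega) (List.pairwise_cons.mp hps).2 (fun y hy => by have := hxt y hy; omega)]
      apply pvMax_congr
      intro y
      rw [hMiff]
      simp only [pvM]
      constructor
      · rintro (⟨h1, h2⟩ | h)
        · by_cases hyy : y ≤ p
          · exact Or.inl ⟨h1, hyy⟩
          · exact Or.inr (Or.inl (by omega))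
        · exact Or.inr (Or.inr h)
      · rintro (⟨h1, h2⟩ | rfl | h)
        · exact Or.inl ⟨h1, by omega⟩
        · exact Or.inl ⟨by omega, by omega⟩
        · exact Or.inr h
    · have hx2 : p + 2 ≤ x := by omega
      have hM'M : ∀ q, pvM x x t q → pvM s p (x :: t) q := by
        rintro q (⟨h1, h2⟩ | h)
        · exact (hMiff q).mpr (Or.inr (Or.inl (by omega)))
        · exact (hMiff q).mpr (Or.inr (Or.inr h))
      have hM'ge : ∀ q, pvM x x t q → x ≤ q := by
        rintro q (⟨h1, h2⟩ | h)
        · omega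
        · have := hxt q h; omega
      simp only [pvGroup, if_neg hx, List.mem_cons, Prod.mk.injEq]
      rw [ih (le_refl x) (List.pairwise_cons.mp hps).2 hxt]
      constructor
      · rintro (⟨rfl, rfl⟩ | h)
        · refine ⟨(hMiff a).mpr (Or.inl ⟨le_refl _, hsp⟩), hsp,
            fun y h1 h2 => (hMiff y).mpr (Or.inl ⟨h1, h2⟩), ?_, ?_⟩
          · intro hc
            rcases (hMiff _).mp hc with h | h | h
            · omega
            · omega
            · have := hxt _ h; omega
          · intro hc
            rcases (hMiff _).mp hc with h | h | h
            · omega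
            · omega
            · have := hxt _ h; omega
        · obtain ⟨ha, hab, hint, hna, hnb⟩ := h
          have hax : x ≤ a := hM'ge a ha
          refine ⟨hM'M a ha, hab, fun y h1 h2 => hM'M y (hint y h1 h2), ?_, ?_⟩
          · intro hc
            rcases (hMiff _).mp hc with h | h | h
            · omega
            · exact hna (Or.inl (by omega))
            · exact hna (Or.inr h)
          · intro hc
            rcases (hMiff _).mp hc with h | h | h
            · omega
            · exact hnb (Or.inl (by omega))
            · exact hnb (Or.inr h)
      · rintro ⟨ha, hab, hint, hna, hnb⟩
        rcases (hMiff a).mp ha with h | h | h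
        · -- a lies in [s,p]: this is the run (s,p)
          left
          have has : a = s := by
            by_contra hne
            exact hna ((hMiff _).mpr (Or.inl ⟨by omega, by omega⟩))
          have hbp : b ≤ p := by
            by_contra hbp'
            have hm := hint (p + 1) (by omega) (by omega)
            rcases (hMiff _).mp hm with h' | h' | h'
            · omega
            · omega
            · have := hxt _ h'; omega
          have hbe : b = p := by
            by_contra hne
            exact hnb ((hMiff _).mpr (Or.inl ⟨by omega, by omega⟩))
          exact ⟨has, hbe⟩
        · -- a = x
          right
          subst h
          refine ⟨Or.inl ⟨le_refl _, le_refl _⟩, hab, ?_, ?_, ?_⟩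
          · intro y h1 h2
            rcases (hMiff y).mp (hint y h1 h2) with h' | h' | h'
            · omega
            · exact Or.inl (by omega)
            · exact Or.inr h'
          · intro hc
            exact hna (hM'M _ hc)
          · intro hc
            exact hnb (hM'M _ hc)
        · -- a ∈ t
          right
          have hax : x < a := hxt _ h
          refine ⟨Or.inr h, hab, ?_, ?_, ?_⟩
          · intro y h1 h2
            rcases (hMiff y).mp (hint y h1 h2) with h' | h' | h'
            · omega
            · exact Or.inl (by omega)
            · exact Or.inr h'
          · intro hc
            exact hna (hM'M _ hc)
          · intro hc
            exact hnb (hM'M _ hc)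

theorem pvGroup_le {l : List Int} {s p : Int} (hsp : s ≤ p)
    (hps : l.Pairwise (· < ·)) (hgt : ∀ x ∈ l, p < x) :
    ∀ r ∈ pvGroup s p l, s ≤ r.1 ∧ r.1 ≤ r.2 := by
  intro r hr
  obtain ⟨a, b⟩ := r
  rw [mem_pvGroup hsp hps hgt] at hr
  obtain ⟨ha, hab, -⟩ := hr
  rcases ha with ⟨h1, _⟩ | h
  · exact ⟨h1, hab⟩
  · exact ⟨by have := hgt _ h; omega, hab⟩

theorem pvGroup_pairwise {l : List Int} {s p : Int} (hsp : s ≤ p)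
    (hps : l.Pairwise (· < ·)) (hgt : ∀ x ∈ l, p < x) :
    (pvGroup s p l).Pairwise (fun u v => u.2 < v.2) := by
  induction l generalizing s p with
  | nil => simp [pvGroup]
  | cons x t ih =>
    have hxt : ∀ y ∈ t, x < y := fun y hy => (List.pairwise_cons.mp hps).1 y hy
    have hxp : p < x := hgt x (List.mem_cons_self ..)
    by_cases hx : x = p + 1
    · simpa [pvGroup, hx] using
        ih (by omega) (List.pairwise_cons.mp hps).2 (fun y hy => by have := hxt y hy; omega)
    · simp only [pvGroup, if_neg hx]
      refine List.Pairwise.cons ?_ (ih (le_refl x) (List.pairwise_cons.mp hps).2 hxt)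
      intro r hr
      have := pvGroup_le (le_refl x) (List.pairwise_cons.mp hps).2 hxt r hr
      simp only
      omega

theorem filter_le_succ (s : List Int) (a : Int) :
    (s.filter (fun y => decide (a ≤ y))).length
      = (s.filter (fun y => decide (a < y))).length + s.count a := by
  induction s with
  | nil => simp
  | cons x t ih =>
    simp only [List.filter_cons, List.count_cons]
    split_ifs <;> simp_all <;> omega

theorem pvWalkEnd_spec {s : List Int} (hn : s.Nodup) :
    ∀ (fuel : Nat) (a : Int), a ∈ s →
      (s.filter (fun y => decide (a ≤ y))).length ≤ fuel →
      a ≤ pvWalkEnd s a fuel ∧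
      (∀ y, a ≤ y → y ≤ pvWalkEnd s a fuel → y ∈ s) ∧
      (pvWalkEnd s a fuel + 1) ∉ s := by
  intro fuel
  induction fuel with
  | zero =>
    intro a ha hlen
    exfalso
    have hmf : a ∈ s.filter (fun y => decide (a ≤ y)) := by
      simp [List.mem_filter, ha]
    have := List.length_pos_of_mem hmf
    omega
  | succ f ih =>
    intro a ha hlen
    simp only [pvWalkEnd]
    by_cases hmem : (a + 1) ∈ s
    · rw [if_pos hmem]
      have hcount : s.count a = 1 := List.count_eq_one_of_mem hn ha
      have hlen' : (s.filter (fun y => decide (a + 1 ≤ y))).length ≤ f := by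
        have hfc : s.filter (fun y => decide (a + 1 ≤ y)) = s.filter (fun y => decide (a < y)) :=
          List.filter_congr (fun x _ => by rw [decide_eq_decide]; omega)
        have := filter_le_succ s a
        rw [hfc]
        omega
      obtain ⟨h1, h2, h3⟩ := ih (a + 1) hmem hlen'
      refine ⟨by omega, ?_, h3⟩
      intro y hy1 hy2
      by_cases hya : y = a
      · subst hya; exact ha
      · exact h2 y (by omega) hy2
    · rw [if_neg hmem]
      refine ⟨le_refl _, ?_, hmem⟩
      intro y h1 h2
      have hya : y = a := by omega
      subst hya
      exact ha

theorem pvMax_unique {s : List Int} {a b b' : Int}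
    (h : pvMax (fun y => y ∈ s) a b)
    (hb' : a ≤ b' ∧ (∀ y, a ≤ y → y ≤ b' → y ∈ s) ∧ (b' + 1) ∉ s) :
    b = b' := by
  obtain ⟨_, hab, hint, _, hbn⟩ := h
  obtain ⟨hab', hint', hbn'⟩ := hb'
  by_contra hne
  rcases lt_or_gt_of_ne hne with h1 | h1
  · exact hbn (hint' (b + 1) (by omega) (by omega))
  · exact hbn' (hint (b' + 1) (by omega) (by omega))

theorem foldl_out (s : List Int) (g : Int → Int) :
    ∀ (l : List Int) (acc : List (Int × Int)),
    (l.foldl (fun out x => if (x - 1) ∈ s then out else out ++ [(x, g x)]) acc)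
      = acc ++ (l.filter (fun x => !decide ((x - 1) ∈ s))).map (fun x => (x, g x)) := by
  intro l
  induction l with
  | nil => simp
  | cons x t ih =>
    intro acc
    simp only [List.foldl_cons, List.filter_cons]
    by_cases h : (x - 1) ∈ s
    · simp [h, ih]
    · simp [h, ih]

theorem mem_out {pns : List Int} (a b : Int) :
    ((a, b) ∈ ((PySem.Set.ofList pns).foldl (fun out x =>
        if (x - 1) ∈ (PySem.Set.ofList pns) then out
        else out ++ [(x, pvWalkEnd (PySem.Set.ofList pns) x (PySem.Set.ofList pns).length)]) []))
      ↔ pvMax (fun y => y ∈ pns) a b := by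
  have hmem : ∀ y, y ∈ PySem.Set.ofList pns ↔ y ∈ pns := fun y => PySem.Set.mem_ofList pns y
  have hnds : (PySem.Set.ofList pns).Nodup := PySem.Set.nodup_ofList pns
  rw [foldl_out]
  simp only [List.nil_append, List.mem_map, List.mem_filter, Bool.not_eq_eq_eq_not,
    Bool.not_true, decide_eq_false_iff_not]
  constructor
  · rintro ⟨x, ⟨hxs, hx1⟩, heq⟩
    rw [Prod.mk.injEq] at heq
    obtain ⟨h4, h5⟩ := heq
    subst h4
    subst h5
    obtain ⟨h1, h2, h3⟩ := pvWalkEnd_spec hnds (PySem.Set.ofList pns).length x hxs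
      (List.length_filter_le _ _)
    refine ⟨(hmem x).mp hxs, h1, fun y hy1 hy2 => (hmem y).mp (h2 y hy1 hy2),
      fun hc => hx1 ((hmem _).mpr hc), fun hc => h3 ((hmem _).mpr hc)⟩
  · intro h
    obtain ⟨ha, hab, hint, hna, hnb⟩ := h
    refine ⟨a, ⟨(hmem a).mpr ha, fun hc => hna ((hmem _).mp hc)⟩, ?_⟩
    obtain ⟨h1, h2, h3⟩ := pvWalkEnd_spec hnds (PySem.Set.ofList pns).length a ((hmem a).mpr ha)
      (List.length_filter_le _ _)
    have hs : pvMax (fun y => y ∈ PySem.Set.ofList pns) a b :=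
      (pvMax_congr (fun y => (hmem y).symm) a b).mp ⟨ha, hab, hint, hna, hnb⟩
    have hb : b = pvWalkEnd (PySem.Set.ofList pns) a (PySem.Set.ofList pns).length :=
      pvMax_unique hs ⟨h1, h2, h3⟩
    rw [hb]

theorem out_nodup (pns : List Int) :
    ((PySem.Set.ofList pns).foldl (fun out x =>
        if (x - 1) ∈ (PySem.Set.ofList pns) then out
        else out ++ [(x, pvWalkEnd (PySem.Set.ofList pns) x (PySem.Set.ofList pns).length)]) []).Nodup := by
  rw [foldl_out]
  simp only [List.nil_append]
  refine List.Nodup.map ?_ ((PySem.Set.nodup_ofList pns).filter _)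
  intro x y hxy
  exact congrArg Prod.fst hxy

-- ===== VERDICT (by name: the statement is the Claim_ definition above) =====
theorem intervals_from_set_py_spec : Claim_equal_intervals_from_set_py := by
  intro pns hdom hpre
  unfold Spec_intervals_from_set_py intervals_from_set_py intervals_from_set_py_alt
  by_cases hemp : pns = []
  · subst hemp; rfl
  · rw [if_neg hemp]
    have hperm := PySem.List.sorted_perm pns (fun x => x) false
    have hnd : (PySem.List.sorted pns (fun x => x) false).Nodup := hperm.nodup_iff.mpr hpre
    have hpw := PySem.List.sorted_pairwise pns (fun x => x)
    have hlt : (PySem.List.sorted pns (fun x => x) false).Pairwise (· < ·) :=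
      (hpw.and hnd).imp (fun h => lt_of_le_of_ne h.1 h.2)
    rcases hcons : PySem.List.sorted pns (fun x => x) false with _ | ⟨n0, tail⟩
    · exact absurd ((PySem.List.sorted_eq_nil_iff pns _ false).mp hcons) hemp
    · rw [hcons] at hperm hlt
      have htail_pw : tail.Pairwise (· < ·) := (List.pairwise_cons.mp hlt).2
      have htail_gt : ∀ y ∈ tail, n0 < y := (List.pairwise_cons.mp hlt).1
      simp only [pvGroup_foldl, List.nil_append]
      have hmemA : ∀ a b, ((a, b) ∈ pvGroup n0 n0 tail ↔ pvMax (fun y => y ∈ pns) a b) := by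
        intro a b
        rw [mem_pvGroup (le_refl n0) htail_pw htail_gt]
        apply pvMax_congr
        intro y
        rw [← hperm.mem_iff]
        simp only [pvM, List.mem_cons]
        constructor
        · rintro (⟨h1, h2⟩ | h)
          · exact Or.inl (by omega)
          · exact Or.inr h
        · rintro (rfl | h)
          · exact Or.inl ⟨le_refl _, le_refl _⟩
          · exact Or.inr h
      have hpwA : (pvGroup n0 n0 tail).Pairwise (fun u v => u.2 < v.2) :=
        pvGroup_pairwise (le_refl n0) htail_pw htail_gt
      have hndA : (pvGroup n0 n0 tail).Nodup :=
        hpwA.imp (fun h he => by subst he; exact lt_irrefl _ h)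
      have hpermAB : ((PySem.Set.ofList pns).foldl (fun out x =>
          if (x - 1) ∈ (PySem.Set.ofList pns) then out
          else out ++ [(x, pvWalkEnd (PySem.Set.ofList pns) x (PySem.Set.ofList pns).length)]) []).Perm
            (pvGroup n0 n0 tail) := by
        rw [List.perm_ext_iff_of_nodup (out_nodup pns) hndA]
        intro r
        obtain ⟨a, b⟩ := r
        rw [mem_out, hmemA]
      have hrevA : (pvGroup n0 n0 tail).reverse.Pairwise
          (fun u v : Int × Int => v.2 < u.2) := List.pairwise_reverse.mpr hpwA
      rw [PySem.List.sorted_rev_eq_of_perm_of_pairwise_gt _ (pvGroup n0 n0 tail).reverse _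
        (List.reverse_perm _) hrevA]
      rw [PySem.List.sorted_rev_eq_of_perm_of_pairwise_gt _ (pvGroup n0 n0 tail).reverse _
        ((List.reverse_perm _).trans hpermAB.symm) hrevA]
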